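-- pv_equiv track=rewrite | github.com/jjorloff1/brenton-lxx-error-finder | check_missing_words.py | derive_word_set
-- ===== SOURCE A (Python) =====
-- def derive_word_set(words_dict):
--     """Derive normalized->original mapping from word_id dictionary.
--     words_dict maps word_id -> {'normalized': str, 'original': str}.
--     Returns dict mapping normalized -> original.
--     """
--     word_set = {}
--     for word_data in words_dict.values():
--         normalized = word_data['normalized']
--         original = word_data['original']
--         # Keep first occurrence (prefer earlier instances)
--         if normalized not in word_set:
--             word_set[normalized] = original
--     return word_set
-- ===== SOURCE B (Python) =====
-- def derive_word_set(words_dict):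
--     """Derive normalized->original mapping from word_id dictionary.
--
--     Two-pass scheme with no membership test: a reversed sweep where the
--     last write wins records each normalized form's earliest original,
--     then a forward comprehension lays the keys out in first-seen order.
--     """
--     vals = list(words_dict.values())
--     earliest = {}
--     for wd in reversed(vals):
--         earliest[wd['normalized']] = wd['original']
--     return {wd['normalized']: earliest[wd['normalized']] for wd in vals}
-- ===== Notes on version B (the rewrite author's own statement) =====
-- stated objective: alternative
-- what changed: Replaces A's single guarded pass (insert only if the key is unseen) by a guard-free two-pass scheme: a reversed sweep where last-write-wins records each normalized form's earliest original, then a forward comprehension lays the keys out in first-seen order; Pre_ only excludes value dicts missing the 'normalized' or 'original' key, where A raises KeyError.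
import Mathlib
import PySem

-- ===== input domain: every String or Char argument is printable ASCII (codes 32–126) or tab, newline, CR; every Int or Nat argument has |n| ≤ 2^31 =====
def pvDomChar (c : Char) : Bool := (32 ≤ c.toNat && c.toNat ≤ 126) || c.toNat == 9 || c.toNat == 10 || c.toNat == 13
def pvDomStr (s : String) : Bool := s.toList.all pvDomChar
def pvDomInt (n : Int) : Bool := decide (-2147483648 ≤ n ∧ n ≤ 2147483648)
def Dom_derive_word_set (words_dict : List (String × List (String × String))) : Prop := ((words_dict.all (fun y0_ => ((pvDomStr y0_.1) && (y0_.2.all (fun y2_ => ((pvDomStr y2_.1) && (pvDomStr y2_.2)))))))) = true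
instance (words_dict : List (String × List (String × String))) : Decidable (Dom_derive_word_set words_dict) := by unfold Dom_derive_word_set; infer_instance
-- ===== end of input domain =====

-- B replaces A's single guarded pass by a guard-free two-pass scheme (reversed last-write-wins
-- sweep, then a forward comprehension for first-seen key order); same return value under Pre_.

-- ===== PORT A =====
-- forward fold over the dict's values, inserting a pair only when its normalized key is unseen
def derive_word_set (words_dict : List (String × List (String × String))) : List (String × String) :=
  ((PySem.Dict.ofList words_dict).values.foldl
    (fun (ws : PySem.Dict String String) word_data =>
      match (PySem.Dict.ofList word_data).get? "normalized", (PySem.Dict.ofList word_data).get? "original" with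
      | some normalized, some original =>
          if ws.contains normalized then ws else ws.insert normalized original
      | _, _ => ws)   -- Python raises KeyError here; excluded by Pre_
    PySem.Dict.empty).items

-- ===== PORT B =====
-- pass 1: reversed sweep, last write wins, so each key ends up with its earliest original;
-- pass 2: forward comprehension over vals reading from `earliest` (first write fixes position)
def derive_word_set_alt (words_dict : List (String × List (String × String))) : List (String × String) :=
  let vals := (PySem.Dict.ofList words_dict).values
  let earliest := vals.reverse.foldl
    (fun (d : PySem.Dict String String) wd =>
      match (PySem.Dict.ofList wd).get? "normalized" with
      | some n =>
        match (PySem.Dict.ofList wd).get? "original" with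
        | some o => d.insert n o
        | none => d   -- Python raises KeyError here; excluded by Pre_
      | none => d)    -- Python raises KeyError here; excluded by Pre_
    PySem.Dict.empty
  (vals.foldl
    (fun (d : PySem.Dict String String) wd =>
      match (PySem.Dict.ofList wd).get? "normalized" with
      | some n =>
        match earliest.get? n with
        | some o => d.insert n o
        | none => d   -- Python raises KeyError here; excluded by Pre_
      | none => d)    -- Python raises KeyError here; excluded by Pre_
    PySem.Dict.empty).items

-- ===== PRECONDITION & SPEC =====
-- Pre_: every value dict carries both the 'normalized' and the 'original' key — Python A (and B)
-- raise KeyError otherwise; nothing else is excluded.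
def Pre_derive_word_set (words_dict : List (String × List (String × String))) : Prop :=
  ∀ p ∈ words_dict, ((PySem.Dict.ofList p.2).contains "normalized") = true ∧
                    ((PySem.Dict.ofList p.2).contains "original") = true
instance (words_dict : List (String × List (String × String))) : Decidable (Pre_derive_word_set words_dict) := by unfold Pre_derive_word_set; infer_instance

def pvWitness_derive_word_set : (List (String × List (String × String))) :=
  [("w1", [("normalized", "kai"), ("original", "KAI")]),
   ("w2", [("normalized", "kai"), ("original", "kai.")])]

def Spec_derive_word_set (words_dict : List (String × List (String × String))) (out : List (String × String)) : Prop := out = derive_word_set_alt words_dict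
instance (words_dict : List (String × List (String × String))) (out : List (String × String)) : Decidable (Spec_derive_word_set words_dict out) := by unfold Spec_derive_word_set; infer_instance

-- ===== CLAIM (what is proved, stated in full; the proofs are below) =====
def Claim_equal_derive_word_set : Prop := ∀ (words_dict : List (String × List (String × String))), Dom_derive_word_set words_dict → Pre_derive_word_set words_dict → Spec_derive_word_set words_dict (derive_word_set words_dict)

-- ===== LEMMAS AND PROOFS =====

-- the two key projections of a value dict, totalised (under Pre_ both keys are present)
def dwsN (wd : List (String × String)) : String := (PySem.Dict.ofList wd).getD "normalized" ""
def dwsO (wd : List (String × String)) : String := (PySem.Dict.ofList wd).getD "original" ""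
def dwsEx (wd : List (String × String)) : String × String := (dwsN wd, dwsO wd)

-- inserting a value the dict already holds at that key changes nothing
lemma dws_insert_eq_self (d : PySem.Dict String String) (k v : String)
    (hnd : d.keys.Nodup) (h : d.get? k = some v) : d.insert k v = d := by
  apply PySem.Dict.ext
  have hc : d.contains k = true := by
    rw [PySem.Dict.contains_eq_isSome_get?, h]; rfl
  rw [PySem.Dict.items_insert_of_contains _ _ hc]
  conv_rhs => rw [← List.map_id d.items]
  apply List.map_congr_left
  intro p hp
  by_cases hpk : p.1 = k
  · have hp' : (k, p.2) ∈ d.items := by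
      have : p = (k, p.2) := by cases p; simp_all
      rwa [← this]
    have := PySem.Dict.get?_of_mem_items d hp' hnd
    rw [h] at this
    cases p; simp_all
  · simp [hpk]

-- every value of a dict built from an association list is the second component of one of its pairs
lemma dws_mem_values_ofList (l : List (String × List (String × String)))
    (wd : List (String × String)) (h : wd ∈ (PySem.Dict.ofList l).values) :
    ∃ p ∈ l, p.2 = wd := by
  suffices H : ∀ (d : PySem.Dict String (List (String × String))),
      wd ∈ (l.foldl (fun acc p => acc.insert p.1 p.2) d).values →
      wd ∈ d.values ∨ ∃ p ∈ l, p.2 = wd by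
    have := H PySem.Dict.empty h
    simpa [PySem.Dict.empty, PySem.Dict.values] using this
  clear h
  induction l with
  | nil => intro d h; exact Or.inl h
  | cons q rest ih =>
    intro d h
    rcases ih _ h with h' | ⟨p, hp, hpe⟩
    · rcases PySem.Dict.mem_values_insert _ _ _ _ h' with he | hd
      · exact Or.inr ⟨q, by simp, he.symm⟩
      · exact Or.inl hd
    · exact Or.inr ⟨p, by simp [hp], hpe⟩

-- the reversed last-write-wins pass answers lookups by the FIRST matching pair of the list
lemma dws_foldr_insert_get? (L : List (String × String)) (n : String) :
    (L.foldr (fun p d => d.insert p.1 p.2) PySem.Dict.empty).get? n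
      = (L.find? (fun q => q.1 == n)).map (·.2) := by
  induction L with
  | nil => simp [PySem.Dict.get?_empty]
  | cons p rest ih =>
    simp only [List.foldr_cons, List.find?_cons]
    by_cases hn : n = p.1
    · subst hn; simp [PySem.Dict.get?_insert_self]
    · have hb : (p.1 == n) = false := by simp [Ne.symm hn]
      rw [PySem.Dict.get?_insert_of_ne _ _ hn, ih, hb]

-- core: A's guarded pass and B's lookup pass agree, given that the lookup dict f answers
-- first-occurrence values for keys not yet in the accumulator and agrees with the accumulator
lemma dws_core (f : PySem.Dict String String) (L : List (String × String))
    (d : PySem.Dict String String) (hnd : d.keys.Nodup)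
    (I1 : ∀ n, d.contains n = false → f.get? n = (L.find? (fun q => q.1 == n)).map (·.2))
    (I2 : ∀ n v, d.get? n = some v → f.get? n = some v) :
    L.foldl (fun ws p => if ws.contains p.1 then ws else ws.insert p.1 p.2) d
      = L.foldl (fun w p => match f.get? p.1 with | some o => w.insert p.1 o | none => w) d := by
  induction L generalizing d with
  | nil => rfl
  | cons p rest ih =>
    simp only [List.foldl_cons]
    by_cases hc : d.contains p.1 = true
    · have hsome : (d.get? p.1).isSome := by rw [← PySem.Dict.contains_eq_isSome_get?, hc]
      obtain ⟨v, hv⟩ := Option.isSome_iff_exists.mp hsome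
      have hf : f.get? p.1 = some v := I2 _ _ hv
      simp only [hf, if_pos hc, dws_insert_eq_self d p.1 v hnd hv]
      apply ih d hnd
      · intro n hn
        have hne : ¬ (p.1 == n) = true := by
          intro he
          rw [eq_of_beq he] at hc
          rw [hc] at hn
          exact absurd hn (by simp)
        have := I1 n hn
        rwa [List.find?_cons_of_neg (p := fun (q : String × String) => q.1 == n) hne] at this
      · exact I2
    · have hc' : d.contains p.1 = false := by simpa using hc
      have hf : f.get? p.1 = some p.2 := by
        rw [I1 p.1 hc', List.find?_cons_of_pos (p := fun (q : String × String) => q.1 == p.1) (by simp)]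
        rfl
      simp only [hf, hc', if_neg Bool.false_ne_true]
      apply ih (d.insert p.1 p.2) (PySem.Dict.nodup_keys_insert _ _ _ hnd)
      · intro n hn
        rw [PySem.Dict.contains_insert] at hn
        have hne : (n == p.1) = false := by
          cases h : (n == p.1) <;> simp_all
        have hdn : d.contains n = false := by
          cases h : d.contains n <;> simp_all
        have hne' : ¬ (p.1 == n) = true := by
          intro he; rw [eq_of_beq he] at hne; simp at hne
        have := I1 n hdn
        rwa [List.find?_cons_of_neg (p := fun (q : String × String) => q.1 == n) hne'] at this
      · intro n v hv
        by_cases hnp : n = p.1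
        · subst hnp
          rw [PySem.Dict.get?_insert_self] at hv
          rw [hf, ← hv]
        · rw [PySem.Dict.get?_insert_of_ne _ _ hnp] at hv
          exact I2 _ _ hv

-- ===== VERDICT (by name: the statement is the Claim_ definition above) =====
theorem derive_word_set_spec : Claim_equal_derive_word_set := by
  intro words_dict _ hpre
  unfold Spec_derive_word_set derive_word_set derive_word_set_alt
  simp only []
  have hkeys : ∀ wd ∈ (PySem.Dict.ofList words_dict).values,
      (PySem.Dict.ofList wd).get? "normalized" = some (dwsN wd) ∧
      (PySem.Dict.ofList wd).get? "original" = some (dwsO wd) := by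
    intro wd hwd
    obtain ⟨p, hp, hpe⟩ := dws_mem_values_ofList _ _ hwd
    obtain ⟨h1, h2⟩ := hpre p hp
    rw [hpe] at h1 h2
    rw [PySem.Dict.contains_eq_isSome_get?] at h1 h2
    obtain ⟨n, hn⟩ := Option.isSome_iff_exists.mp h1
    obtain ⟨o, ho⟩ := Option.isSome_iff_exists.mp h2
    constructor
    · rw [hn]; simp [dwsN, PySem.Dict.getD_eq_get?_getD, hn]
    · rw [ho]; simp [dwsO, PySem.Dict.getD_eq_get?_getD, ho]
  set vals := (PySem.Dict.ofList words_dict).values with hvals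
  set L := vals.map dwsEx with hL
  have hA : vals.foldl
      (fun (ws : PySem.Dict String String) word_data =>
        match (PySem.Dict.ofList word_data).get? "normalized", (PySem.Dict.ofList word_data).get? "original" with
        | some normalized, some original =>
            if ws.contains normalized then ws else ws.insert normalized original
        | _, _ => ws) PySem.Dict.empty
      = L.foldl (fun ws p => if ws.contains p.1 then ws else ws.insert p.1 p.2) PySem.Dict.empty := by
    rw [hL, List.foldl_map]
    apply PySem.List.foldl_congr_mem
    intro acc wd hwd
    rw [(hkeys wd hwd).1, (hkeys wd hwd).2]
    rfl
  have hE : vals.reverse.foldl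
      (fun (d : PySem.Dict String String) wd =>
        match (PySem.Dict.ofList wd).get? "normalized" with
        | some n =>
          match (PySem.Dict.ofList wd).get? "original" with
          | some o => d.insert n o
          | none => d
        | none => d) PySem.Dict.empty
      = L.foldr (fun p d => d.insert p.1 p.2) PySem.Dict.empty := by
    have h1 : vals.reverse.foldl
        (fun (d : PySem.Dict String String) wd =>
          match (PySem.Dict.ofList wd).get? "normalized" with
          | some n =>
            match (PySem.Dict.ofList wd).get? "original" with
            | some o => d.insert n o
            | none => d
          | none => d) PySem.Dict.empty
        = vals.reverse.foldl (fun (d : PySem.Dict String String) wd =>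
            d.insert (dwsEx wd).1 (dwsEx wd).2) PySem.Dict.empty := by
      apply PySem.List.foldl_congr_mem
      intro acc wd hwd
      have hwd' : wd ∈ vals := List.mem_reverse.mp hwd
      rw [(hkeys wd hwd').1, (hkeys wd hwd').2]
      rfl
    rw [h1, ← List.foldl_reverse, hL, ← List.map_reverse, List.foldl_map]
  rw [hA, hE]
  set f := L.foldr (fun p d => d.insert p.1 p.2) PySem.Dict.empty with hf
  have hB : vals.foldl
      (fun (d : PySem.Dict String String) wd =>
        match (PySem.Dict.ofList wd).get? "normalized" with
        | some n => match f.get? n with | some o => d.insert n o | none => d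
        | none => d) PySem.Dict.empty
      = L.foldl (fun w p => match f.get? p.1 with | some o => w.insert p.1 o | none => w) PySem.Dict.empty := by
    rw [hL, List.foldl_map]
    apply PySem.List.foldl_congr_mem
    intro acc wd hwd
    rw [(hkeys wd hwd).1]
    rfl
  rw [hB]
  congr 1
  apply dws_core
  · exact PySem.Dict.nodup_keys_empty
  · intro n _
    exact dws_foldr_insert_get? L n
  · intro n v hv
    rw [PySem.Dict.get?_empty] at hv
    exact absurd hv (by simp)
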